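-- pv_equiv track=rewrite | github.com/Aryudesu/ABC | other/fourSq.py | calc
-- ===== SOURCE A (Python) =====
-- def calc(data: list)-> int:
--     if not data:
--         return 1
--     MOD = 998244353
--     data_dict = dict()
--     for n in data:
--         if n == 2 and n in data_dict:
--             continue
--         data_dict[n] = (data_dict.get(n, 1) * n + 1)%MOD
--     result = 8
--     for k in data_dict:
--         result = (result * data_dict.get(k, 1)) % MOD
--     return result
-- ===== SOURCE B (Python) =====
-- MOD = 998244353
--
-- def _factor(k, c):
--     # c steps of f -> (f*k+1) % MOD starting from 1
--     f = 1
--     for _ in range(c):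
--         f = (f * k + 1) % MOD
--     return f
--
-- def calc(data: list) -> int:
--     if not data:
--         return 1
--     counts = {}
--     for n in data:
--         counts[n] = counts.get(n, 0) + 1
--     result = 8
--     for k, c in counts.items():
--         f = 3 if k == 2 else _factor(k, c)
--         result = (result * f) % MOD
--     return result
-- ===== Notes on version B (the rewrite author's own statement) =====
-- stated objective: alternative
-- what changed: B first builds a plain occurrence counter in one pass and then computes each distinct key's factor by an isolated per-key geometric loop (with the key-2 special case made explicit as the constant 3), instead of A's single pass that interleaves dict membership tests, the skip-on-2 branch and the modular update while traversing every element.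
import Mathlib
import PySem

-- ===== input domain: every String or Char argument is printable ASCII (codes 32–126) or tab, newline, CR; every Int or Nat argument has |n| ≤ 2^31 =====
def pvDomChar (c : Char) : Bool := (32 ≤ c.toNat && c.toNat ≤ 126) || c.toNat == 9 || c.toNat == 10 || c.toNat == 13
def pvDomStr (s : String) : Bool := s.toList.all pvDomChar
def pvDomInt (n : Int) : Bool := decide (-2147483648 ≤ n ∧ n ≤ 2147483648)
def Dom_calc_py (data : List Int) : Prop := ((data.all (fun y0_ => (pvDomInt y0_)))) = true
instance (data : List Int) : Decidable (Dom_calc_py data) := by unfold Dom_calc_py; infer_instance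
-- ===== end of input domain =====

-- B separates counting occurrences from a per-key geometric loop instead of A's interleaved
-- single-pass dict update with a skip-on-2 branch; same cost, different decomposition.

-- ===== PORT A =====
def calc_py (data : List Int) : Int :=
  if data = [] then 1
  else
    let dd := data.foldl (fun d n =>
        if n == 2 && d.contains n then d
        else d.insert n (PySem.Int.mod (d.getD n 1 * n + 1) 998244353))
      PySem.Dict.empty
    dd.keys.foldl (fun r k => PySem.Int.mod (r * dd.getD k 1) 998244353) 8

-- ===== PORT B =====
-- Source B's _factor: f = 1; for _ in range(c): f = (f*k+1) % MOD
def pvFactorLoop (k c : Int) : Int :=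
  (PySem.List.pyRange 0 c 1).foldl (fun f _ => PySem.Int.mod (f * k + 1) 998244353) 1

def calc_py_alt (data : List Int) : Int :=
  if data = [] then 1
  else
    let counts := data.foldl (fun d n => d.insert n (d.getD n 0 + 1)) PySem.Dict.empty
    counts.items.foldl (fun r p =>
      PySem.Int.mod (r * (if p.1 == 2 then 3 else pvFactorLoop p.1 p.2)) 998244353) 8

-- ===== PRECONDITION & SPEC =====
def Spec_calc_py (data : List Int) (out : Int) : Prop := out = calc_py_alt data
instance (data : List Int) (out : Int) : Decidable (Spec_calc_py data out) := by unfold Spec_calc_py; infer_instance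

-- ===== CLAIM (what is proved, stated in full; the proofs are below) =====
def Claim_equal_calc_py : Prop := ∀ (data : List Int), Dom_calc_py data → Spec_calc_py data (calc_py data)

-- ===== LEMMAS AND PROOFS =====

-- the value A's dict holds for a key occurring c (≥ 1) times
def pvFactorN (k : Int) : Nat → Int
  | 0 => 1
  | c + 1 => PySem.Int.mod (pvFactorN k c * k + 1) 998244353

def pvVal (k : Int) (c : Nat) : Int := if k = 2 then 3 else pvFactorN k c

lemma pvFactorLoop_natCast (k : Int) (c : Nat) : pvFactorLoop k (c : Int) = pvFactorN k c := by
  induction c with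
  | zero => rfl
  | succ c ih =>
    unfold pvFactorLoop at *
    have h : ((c + 1 : Nat) : Int) = (c : Int) + 1 := by push_cast; ring
    rw [h, PySem.List.pyRange_one_succ_right (by positivity), List.foldl_append,
      List.foldl_cons, List.foldl_nil, ih]
    rfl

lemma pvCount_append_ne {k x : Int} (h : k ≠ x) (l : List Int) :
    (l ++ [x]).count k = l.count k := by
  simp [List.count_append, Ne.symm h]

-- A's dict after the first loop, characterised key by key
lemma calc_py_dict (l : List Int) :
    l.foldl (fun d n =>
        if n == 2 && d.contains n then d
        else d.insert n (PySem.Int.mod (d.getD n 1 * n + 1) 998244353))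
      PySem.Dict.empty
      = PySem.Dict.mk ((PySem.Set.ofList l).map (fun k => (k, pvVal k (l.count k)))) := by
  induction l using List.reverseRecOn with
  | nil => rfl
  | append_singleton l x ih =>
    rw [List.foldl_append, ih, List.foldl_cons, List.foldl_nil]
    have hkeys : (PySem.Dict.mk ((PySem.Set.ofList l).map (fun k => (k, pvVal k (l.count k))))).keys
        = PySem.Set.ofList l := by
      simp [PySem.Dict.keys, Function.comp_def]
    have hcontains : (PySem.Dict.mk ((PySem.Set.ofList l).map (fun k => (k, pvVal k (l.count k))))).contains x
        = decide (x ∈ l) := by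
      rw [PySem.Dict.contains_eq_decide_mem_keys, hkeys]
      simp [PySem.Set.mem_ofList]
    have hknodup : (PySem.Dict.mk ((PySem.Set.ofList l).map (fun k => (k, pvVal k (l.count k))))).keys.Nodup := by
      rw [hkeys]; exact PySem.Set.nodup_ofList l
    by_cases hx : x ∈ l
    · -- x already a key
      have hS : PySem.Set.ofList (l ++ [x]) = PySem.Set.ofList l := by
        rw [PySem.Set.ofList_append_singleton, PySem.Set.add_of_mem (by simpa [PySem.Set.mem_ofList])]
      have hgetD : (PySem.Dict.mk ((PySem.Set.ofList l).map (fun k => (k, pvVal k (l.count k))))).getD x 1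
          = pvVal x (l.count x) := by
        exact PySem.Dict.getD_of_mem_items (PySem.Dict.mk ((PySem.Set.ofList l).map (fun k => (k, pvVal k (l.count k))))) (List.mem_map.mpr ⟨x, by simpa [PySem.Set.mem_ofList], rfl⟩) hknodup 1
      by_cases h2 : x = 2
      · -- skip branch
        subst h2
        rw [if_pos (by simp [hcontains, hx])]
        apply PySem.Dict.ext
        rw [hS]
        apply List.map_congr_left
        intro k hk
        by_cases hk2 : k = 2
        · simp [pvVal, hk2]
        · rw [pvCount_append_ne hk2 l]
      · -- overwrite branch
        rw [if_neg (by simp [h2])]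
        apply PySem.Dict.ext
        rw [PySem.Dict.items_insert_of_contains _ _ (by simp [hcontains, hx]), hS]
        simp only [List.map_map]
        apply List.map_congr_left
        intro k hk
        by_cases hkx : k = x
        · subst hkx
          have hc : (l ++ [k]).count k = l.count k + 1 := by
            simp [List.count_append]
          simp only [Function.comp_def, beq_self_eq_true, if_pos, hc, hgetD]
          simp only [pvVal, if_neg h2, pvFactorN]
        · simp [hkx, pvCount_append_ne hkx l]
    · -- fresh key
      have hS : PySem.Set.ofList (l ++ [x]) = PySem.Set.ofList l ++ [x] := by
        rw [PySem.Set.ofList_append_singleton, PySem.Set.add_of_not_mem (by simpa [PySem.Set.mem_ofList])]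
      have hco : (PySem.Dict.mk ((PySem.Set.ofList l).map (fun k => (k, pvVal k (l.count k))))).contains x = false := by
        simp [hcontains, hx]
      have hgetD : (PySem.Dict.mk ((PySem.Set.ofList l).map (fun k => (k, pvVal k (l.count k))))).getD x 1 = 1 :=
        PySem.Dict.getD_of_not_contains _ 1 hco
      rw [if_neg (by simp [hco])]
      apply PySem.Dict.ext
      rw [PySem.Dict.items_insert_of_not_contains _ _ hco, hS, List.map_append]
      congr 1
      · apply List.map_congr_left
        intro k hk
        have hkx : k ≠ x := by
          intro h; subst h; exact hx (by simpa [PySem.Set.mem_ofList] using hk)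
        rw [pvCount_append_ne hkx l]
      · have hc : (l ++ [x]).count x = 1 := by
          simp [List.count_append, List.count_eq_zero_of_not_mem hx]
        rw [hgetD]
        simp only [List.map_cons, List.map_nil, hc]
        by_cases h2 : x = 2
        · subst h2; simp only [pvVal]; decide
        · simp only [pvVal, if_neg h2, pvFactorN, one_mul]

-- ===== VERDICT (by name: the statement is the Claim_ definition above) =====
theorem calc_py_spec : Claim_equal_calc_py := by
  intro data _
  unfold Spec_calc_py calc_py calc_py_alt
  by_cases hd : data = []
  · simp [hd]
  · rw [if_neg hd, if_neg hd]
    simp only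
    rw [calc_py_dict, PySem.Dict.foldl_insert_getD_add_one_eq_counter, PySem.Dict.items_counter]
    have hkeys : (PySem.Dict.mk ((PySem.Set.ofList data).map (fun k => (k, pvVal k (data.count k))))).keys
        = PySem.Set.ofList data := by
      simp [PySem.Dict.keys, Function.comp_def]
    rw [hkeys, List.foldl_map]
    apply PySem.List.foldl_congr_mem
    intro r k hk
    have hknodup : (PySem.Dict.mk ((PySem.Set.ofList data).map (fun k => (k, pvVal k (data.count k))))).keys.Nodup := by
      rw [hkeys]; exact PySem.Set.nodup_ofList data
    have hgetD : (PySem.Dict.mk ((PySem.Set.ofList data).map (fun k => (k, pvVal k (data.count k))))).getD k 1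
        = pvVal k (data.count k) := by
      exact PySem.Dict.getD_of_mem_items (PySem.Dict.mk ((PySem.Set.ofList data).map (fun k => (k, pvVal k (data.count k))))) (List.mem_map.mpr ⟨k, hk, rfl⟩) hknodup 1
    rw [hgetD]
    congr 1
    by_cases h2 : k = 2
    · simp [pvVal, h2]
    · simp [pvVal, h2, pvFactorLoop_natCast]
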